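-- pv_equiv track=rewrite | github.com/Brandtweary/Cymbiont | src/text_parser.py | combine_quotes
-- ===== SOURCE A (Python) =====
-- from typing import List, Optional
--
-- def is_quote(text: str) -> bool:
--     """Determine if a paragraph is a quote block based on quotation marks."""
--     text = text.strip()
--     return text.startswith('"') and text.endswith('"')
--
-- def combine_quotes(paragraphs: List[str]) -> List[str]:
--     """Combine quote blocks with their preceding paragraphs."""
--     result: List[str] = []
--     quote_buffer: List[str] = []
--
--     for para in paragraphs:
--         if is_quote(para):
--             quote_buffer.append(para)
--         else:
--             if result and quote_buffer:
--                 # Combine all accumulated quotes with the previous paragraph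
--                 result[-1] = '\n'.join([result[-1]] + quote_buffer)
--                 quote_buffer.clear()
--             result.append(para)
--
--     # Handle any remaining quotes at the end
--     if quote_buffer and result:
--         result[-1] = '\n'.join([result[-1]] + quote_buffer)
--
--     return result
-- ===== SOURCE B (Python) =====
-- from typing import List
--
--
-- def is_quote(text: str) -> bool:
--     """Determine if a paragraph is a quote block based on quotation marks."""
--     text = text.strip()
--     return text.startswith('"') and text.endswith('"')
--
--
-- def combine_quotes(paragraphs: List[str]) -> List[str]:
--     """Combine quote blocks with their preceding paragraphs.
--
--     Single pass without a quote buffer: strip off the leading run of quotes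
--     first (they belong to the first non-quote paragraph, matching the original
--     behaviour), then attach every later quote immediately to the last
--     paragraph as it is seen.
--     """
--     n = len(paragraphs)
--     i = 0
--     leading: List[str] = []
--     while i < n and is_quote(paragraphs[i]):
--         leading.append(paragraphs[i])
--         i += 1
--     if i == n:
--         # empty input or all quotes: nothing to attach them to
--         return []
--     head = paragraphs[i]
--     for q in leading:
--         head = head + '\n' + q
--     result = [head]
--     for p in paragraphs[i + 1:]:
--         if is_quote(p):
--             result[-1] = result[-1] + '\n' + p
--         else:
--             result.append(p)
--     return result
-- ===== Notes on version B (the rewrite author's own statement) =====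
-- stated objective: alternative
-- what changed: Replaced the quote_buffer/batch-join state machine by a prefix split (leading quotes peeled off first) followed by a single bufferless pass that attaches each later quote immediately to the last emitted paragraph.
import Mathlib
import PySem

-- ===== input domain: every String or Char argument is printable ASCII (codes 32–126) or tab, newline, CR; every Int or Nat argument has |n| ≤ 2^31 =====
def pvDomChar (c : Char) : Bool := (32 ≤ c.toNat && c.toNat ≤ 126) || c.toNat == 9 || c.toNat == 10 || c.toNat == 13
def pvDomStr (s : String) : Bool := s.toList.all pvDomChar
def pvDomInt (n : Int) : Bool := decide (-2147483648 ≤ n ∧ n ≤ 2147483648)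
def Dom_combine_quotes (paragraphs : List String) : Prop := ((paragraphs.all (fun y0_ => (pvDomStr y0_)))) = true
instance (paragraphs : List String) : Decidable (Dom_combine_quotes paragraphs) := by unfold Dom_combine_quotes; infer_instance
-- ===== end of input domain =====

-- B replaces A's quote_buffer/batch-join state machine by a prefix split plus a
-- single bufferless pass that attaches each quote immediately (alternative decomposition, same cost).


-- ===== PORT A =====
-- is_quote: shared module helper (used verbatim by both A and B)
def is_quote (text : String) : Bool :=
  let t := PySem.Str.strip text
  PySem.Str.startswith t "\"" && PySem.Str.endswith t "\""

-- one iteration of A's for-loop over (result, quote_buffer)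
def aStep (st : List String × List String) (para : String) : List String × List String :=
  if is_quote para then
    (st.1, st.2 ++ [para])
  else
    if !st.1.isEmpty && !st.2.isEmpty then
      ((st.1.dropLast ++ [PySem.Str.join "\n" (st.1.getLast! :: st.2)]) ++ [para], [])
    else
      (st.1 ++ [para], st.2)

-- A's trailing "if quote_buffer and result" fix-up
def aFlush (st : List String × List String) : List String :=
  if !st.2.isEmpty && !st.1.isEmpty then
    st.1.dropLast ++ [PySem.Str.join "\n" (st.1.getLast! :: st.2)]
  else
    st.1

def combine_quotes (paragraphs : List String) : List String :=
  aFlush (paragraphs.foldl aStep ([], []))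

-- ===== PORT B =====
-- head = head + '\n' + q  (B's leading-quote attachment)
def jq (h q : String) : String := h ++ "\n" ++ q

-- one iteration of B's main for-loop over result
def bStep (res : List String) (p : String) : List String :=
  if is_quote p then res.dropLast ++ [jq res.getLast! p] else res ++ [p]

def combine_quotes_alt (paragraphs : List String) : List String :=
  -- the while loop collecting `leading` and advancing i = takeWhile / dropWhile
  let leading := paragraphs.takeWhile is_quote
  match paragraphs.dropWhile is_quote with
  | [] => []
  | p :: rest => rest.foldl bStep [leading.foldl jq p]

-- ===== PRECONDITION & SPEC =====
def Spec_combine_quotes (paragraphs : List String) (out : List String) : Prop := out = combine_quotes_alt paragraphs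
instance (paragraphs : List String) (out : List String) : Decidable (Spec_combine_quotes paragraphs out) := by unfold Spec_combine_quotes; infer_instance

-- ===== CLAIM (what is proved, stated in full; the proofs are below) =====
def Claim_equal_combine_quotes : Prop := ∀ (paragraphs : List String), Dom_combine_quotes paragraphs → Spec_combine_quotes paragraphs (combine_quotes paragraphs)

-- ===== LEMMAS AND PROOFS =====

lemma aStep_quote (st : List String × List String) (p : String) (hq : is_quote p = true) :
    aStep st p = (st.1, st.2 ++ [p]) := by
  simp [aStep, hq]

lemma aStep_nq_nil (r : List String) (x p : String) (hq : is_quote p = false) :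
    aStep (r ++ [x], []) p = ((r ++ [x]) ++ [p], []) := by
  simp [aStep, hq]

lemma aStep_nq_buf (r : List String) (x p b : String) (bs : List String) (hq : is_quote p = false) :
    aStep (r ++ [x], b :: bs) p = ((r ++ [PySem.Str.join "\n" (x :: b :: bs)]) ++ [p], []) := by
  simp [aStep, hq]

lemma aStep_empty_nq (buf : List String) (p : String) (hq : is_quote p = false) :
    aStep ([], buf) p = ([p], buf) := by
  simp [aStep, hq]

lemma aFlush_nil (res : List String) : aFlush (res, []) = res := by
  simp [aFlush]

lemma aFlush_buf (r : List String) (x b : String) (bs : List String) :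
    aFlush (r ++ [x], b :: bs) = r ++ [PySem.Str.join "\n" (x :: b :: bs)] := by
  simp [aFlush]

lemma bStep_quote (r : List String) (y p : String) (hq : is_quote p = true) :
    bStep (r ++ [y]) p = r ++ [jq y p] := by
  simp [bStep, hq]

lemma bStep_nq (res : List String) (p : String) (hq : is_quote p = false) :
    bStep res p = res ++ [p] := by
  simp [bStep, hq]

lemma fold_pull_str (bufs : List String) (a b : String) :
    bufs.foldl jq (a ++ b) = a ++ bufs.foldl jq b := by
  induction bufs generalizing b with
  | nil => rfl
  | cons q bs ih =>
      simp only [List.foldl_cons, jq]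
      rw [show a ++ b ++ "\n" ++ q = a ++ (b ++ "\n" ++ q) from by
        simp [String.append_assoc], ih]

lemma join_eq_foldl (buf : List String) (x : String) :
    PySem.Str.join "\n" (x :: buf) = buf.foldl jq x := by
  induction buf generalizing x with
  | nil =>
      apply String.ext
      simp [PySem.Str.join, PySem.Chars.join, List.intercalate]
  | cons q rest ih =>
      have h1 : PySem.Str.join "\n" (x :: q :: rest) = x ++ "\n" ++ PySem.Str.join "\n" (q :: rest) := by
        apply String.ext
        simp [PySem.Chars.join_cons_cons]
      rw [h1, ih q]
      simp only [List.foldl_cons]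
      rw [show jq x q = (x ++ "\n") ++ q from by simp [jq, String.append_assoc]]
      rw [fold_pull_str, String.append_assoc]

lemma foldl_jq_concat (buf : List String) (x h : String) :
    (buf ++ [h]).foldl jq x = jq (buf.foldl jq x) h := by
  simp [List.foldl_append]

-- main loop invariant: once result is nonempty (r ++ [x]) with pending buffer buf,
-- finishing A equals running B's loop from r ++ [buf folded onto x]
lemma loop_eq (ts : List String) : ∀ (r : List String) (x : String) (buf : List String),
    aFlush (ts.foldl aStep (r ++ [x], buf)) = ts.foldl bStep (r ++ [buf.foldl jq x]) := by
  induction ts with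
  | nil =>
      intro r x buf
      cases buf with
      | nil => simp [aFlush_nil]
      | cons b bs =>
          simp only [List.foldl_nil, aFlush_buf, join_eq_foldl]
  | cons h ts ih =>
      intro r x buf
      rcases hq : is_quote h with _ | _
      · cases buf with
        | nil =>
            rw [List.foldl_cons, aStep_nq_nil r x h hq, List.foldl_cons, bStep_nq _ h hq]
            have := ih (r ++ [x]) h []
            simpa using this
        | cons b bs =>
            rw [List.foldl_cons, aStep_nq_buf r x h b bs hq, List.foldl_cons, bStep_nq _ h hq]
            have := ih (r ++ [PySem.Str.join "\n" (x :: b :: bs)]) h []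
            simp only [List.foldl_nil, List.append_assoc] at this ⊢
            rw [this, join_eq_foldl]
      · rw [List.foldl_cons, aStep_quote _ h hq, List.foldl_cons, bStep_quote _ _ h hq]
        rw [ih r x (buf ++ [h]), foldl_jq_concat]

-- leading phase: result still empty, buf holds the quotes collected so far
lemma lead_eq (ps : List String) : ∀ (buf : List String),
    aFlush (ps.foldl aStep ([], buf)) =
      (match ps.dropWhile is_quote with
       | [] => []
       | p :: rest => rest.foldl bStep [(buf ++ ps.takeWhile is_quote).foldl jq p]) := by
  induction ps with
  | nil =>
      intro buf
      simp [aFlush, List.dropWhile]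
  | cons h t ih =>
      intro buf
      rcases hq : is_quote h with _ | _
      · rw [List.foldl_cons, aStep_empty_nq buf h hq]
        simp only [List.dropWhile_cons, List.takeWhile_cons, hq]
        have := loop_eq t [] h buf
        simpa using this
      · rw [List.foldl_cons, aStep_quote _ h hq, ih (buf ++ [h])]
        simp [hq]

-- ===== VERDICT (by name: the statement is the Claim_ definition above) =====
theorem combine_quotes_spec : Claim_equal_combine_quotes := by
  intro paragraphs _
  unfold Spec_combine_quotes combine_quotes combine_quotes_alt
  have := lead_eq paragraphs []
  simp only [List.nil_append] at this
  rw [this]
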